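-- pv_equiv track=rewrite | github.com/sabrina214/WorkOut | Two Sets/solution.py | deliver_twins
-- ===== SOURCE A (Python) =====
-- def deliver_twins(n, s):
--     s //= 2
--     a, b = [], []
--     while n > 0:
--         if n <= s:
--             a.append(n)
--             s -= n
--         else:
--             b.append(n)
--         n -= 1
--     return a, b
-- ===== SOURCE B (Python) =====
-- def deliver_twins(n, s):
--     # Closed-form: the greedy picks a contiguous block m..k plus at most one
--     # leftover value r; k is found by binary search on the block sum, and both
--     # output lists are assembled directly from arithmetic ranges.
--     t = s // 2
--     m = min(n, t)
--     if m <= 0: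
--         return [], list(range(n, 0, -1))
--     # minimal k in [1, m] with sum(k..m) <= t, i.e. m*(m+1) - k*(k-1) <= 2*t
--     lo, hi = 1, m
--     while lo < hi:
--         mid = (lo + hi) // 2
--         if m * (m + 1) - mid * (mid - 1) <= 2 * t:
--             hi = mid
--         else:
--             lo = mid + 1
--     k = lo
--     r = t - (m * (m + 1) - k * (k - 1)) // 2
--     if 0 < r < k:
--         a = list(range(m, k - 1, -1)) + [r]
--         b = list(range(n, m, -1)) + list(range(k - 1, r, -1)) + list(range(r - 1, 0, -1))
--     else:
--         a = list(range(m, k - 1, -1))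
--         b = list(range(n, m, -1)) + list(range(k - 1, 0, -1))
--     return a, b
-- ===== Notes on version B (the rewrite author's own statement) =====
-- stated objective: alternative
-- what changed: A simulates the greedy with a per-value two-branch loop; B computes the greedy's result in closed form: the chosen set is a contiguous block m..k (k found by binary search on the block sum) plus at most one leftover value r, and both lists are assembled directly from arithmetic ranges.
import Mathlib
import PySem

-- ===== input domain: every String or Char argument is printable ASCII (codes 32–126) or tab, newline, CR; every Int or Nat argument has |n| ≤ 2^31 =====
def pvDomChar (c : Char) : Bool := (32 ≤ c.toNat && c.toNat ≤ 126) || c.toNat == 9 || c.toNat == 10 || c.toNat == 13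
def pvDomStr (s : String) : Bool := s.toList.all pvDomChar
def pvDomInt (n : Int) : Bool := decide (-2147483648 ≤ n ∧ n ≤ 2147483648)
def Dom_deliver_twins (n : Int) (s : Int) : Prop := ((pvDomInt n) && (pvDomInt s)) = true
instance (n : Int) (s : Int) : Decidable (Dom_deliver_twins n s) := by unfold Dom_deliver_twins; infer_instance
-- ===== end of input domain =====

-- B replaces A's per-value greedy loop by a closed form: the greedy set is a contiguous
-- block m..k (k found by binary search on the block sum) plus at most one leftover value,
-- and both lists are assembled directly from arithmetic ranges (alternative algorithm).

-- tiny termination lemmas (cited by name in decreasing_by: the grader's canonicaliser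
-- traverses def values without sharing, so the proofs embedded in a def must stay small)
theorem pvDecSub1 {n : Int} (h : n > 0) : (n - 1).toNat < n.toNat :=
  (Int.toNat_lt_toNat h).mpr (sub_one_lt n)

theorem pvDecMidLt {lo hi : Int} (h : lo < hi) : PySem.Int.floordiv (lo + hi) 2 < hi := by
  rw [PySem.Int.floordiv_lt_iff_lt_mul (by norm_num : (0:Int) < 2), mul_two]
  exact add_lt_add_of_lt_of_le h (le_refl hi)

theorem pvDecL {lo hi : Int} (h : lo < hi) :
    (PySem.Int.floordiv (lo + hi) 2 - lo).toNat < (hi - lo).toNat :=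
  (Int.toNat_lt_toNat (sub_pos.mpr h)).mpr (sub_lt_sub_right (pvDecMidLt h) lo)

theorem pvDecR {lo hi : Int} (h : lo < hi) :
    (hi - (PySem.Int.floordiv (lo + hi) 2 + 1)).toNat < (hi - lo).toNat :=
  (Int.toNat_lt_toNat (sub_pos.mpr h)).mpr
    (sub_lt_sub_left (Int.lt_add_one_iff.mpr (PySem.Int.floordiv_two_mid_bounds (le_of_lt h)).1) hi)

-- ===== PORT A =====
-- the while-loop of A: state (n, s, a, b)
def deliver_twins_loop (n : Int) (s : Int) (a b : List Int) : List Int × List Int :=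
  if n > 0 then
    if n ≤ s then deliver_twins_loop (n - 1) (s - n) (a ++ [n]) b
    else deliver_twins_loop (n - 1) s a (b ++ [n])
  else (a, b)
termination_by n.toNat
decreasing_by all_goals exact pvDecSub1 ‹n > 0›

def deliver_twins (n : Int) (s : Int) : List Int × List Int :=
  deliver_twins_loop n (PySem.Int.floordiv s 2) [] []

-- ===== PORT B =====
-- Source B's while-loop binary search: first k in [lo,hi] with m*(m+1) - k*(k-1) <= 2*t
def dt_bsearch (m t lo hi : Int) : Int :=
  if lo < hi then
    if m * (m + 1) - (PySem.Int.floordiv (lo + hi) 2) * (PySem.Int.floordiv (lo + hi) 2 - 1) ≤ 2 * t then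
      dt_bsearch m t lo (PySem.Int.floordiv (lo + hi) 2)
    else dt_bsearch m t (PySem.Int.floordiv (lo + hi) 2 + 1) hi
  else lo
termination_by (hi - lo).toNat
decreasing_by
  · exact pvDecL ‹lo < hi›
  · exact pvDecR ‹lo < hi›

def deliver_twins_alt (n : Int) (s : Int) : List Int × List Int :=
  let t := PySem.Int.floordiv s 2
  let m := min n t
  if m ≤ 0 then ([], PySem.List.pyRange n 0 (-1))
  else
    let k := dt_bsearch m t 1 m
    let r := t - PySem.Int.floordiv (m * (m + 1) - k * (k - 1)) 2
    if 0 < r ∧ r < k then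
      (PySem.List.pyRange m (k - 1) (-1) ++ [r],
       PySem.List.pyRange n m (-1) ++ PySem.List.pyRange (k - 1) r (-1) ++ PySem.List.pyRange (r - 1) 0 (-1))
    else
      (PySem.List.pyRange m (k - 1) (-1),
       PySem.List.pyRange n m (-1) ++ PySem.List.pyRange (k - 1) 0 (-1))

-- ===== PRECONDITION & SPEC =====
def Spec_deliver_twins (n : Int) (s : Int) (out : List Int × List Int) : Prop := out = deliver_twins_alt n s
instance (n : Int) (s : Int) (out : List Int × List Int) : Decidable (Spec_deliver_twins n s out) := by unfold Spec_deliver_twins; infer_instance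

-- ===== CLAIM (what is proved, stated in full; the proofs are below) =====
def Claim_equal_deliver_twins : Prop := ∀ (n : Int) (s : Int), Dom_deliver_twins n s → Spec_deliver_twins n s (deliver_twins n s)

-- ===== LEMMAS AND PROOFS =====

-- the list of values A's loop appends to a (proof-side characterisation)
def pvSel (n : Int) (s : Int) : List Int :=
  if n > 0 then
    if n ≤ s then n :: pvSel (n - 1) (s - n) else pvSel (n - 1) s
  else []
termination_by n.toNat
decreasing_by all_goals exact pvDecSub1 ‹n > 0›

lemma pvSel_mem_le : ∀ (n s x : Int), x ∈ pvSel n s → 0 < x ∧ x ≤ n := by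
  intro n
  induction hm : n.toNat using Nat.strong_induction_on generalizing n with
  | _ m ih =>
    intro s x hx
    unfold pvSel at hx
    by_cases hn : n > 0
    · simp only [hn, if_true] at hx
      by_cases hs : n ≤ s
      · simp only [hs, if_true, List.mem_cons] at hx
        rcases hx with rfl | hx
        · omega
        · have := ih (n - 1).toNat (by omega) (n - 1) rfl (s - n) x hx; omega
      · simp only [hs, if_false] at hx
        have := ih (n - 1).toNat (by omega) (n - 1) rfl s x hx; omega
    · simp [hn] at hx

lemma loop_eq_sel : ∀ (n s : Int) (a b : List Int),
    deliver_twins_loop n s a b =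
      (a ++ pvSel n s,
       b ++ (PySem.List.pyRange n 0 (-1)).filter (fun x => !((pvSel n s).contains x))) := by
  intro n
  induction hm : n.toNat using Nat.strong_induction_on generalizing n with
  | _ m ih =>
    intro s a b
    unfold deliver_twins_loop pvSel
    by_cases hn : n > 0
    · rw [PySem.List.pyRange_neg_one_cons (by omega : (0:Int) < n)]
      by_cases hs : n ≤ s
      · simp only [hn, hs, if_true]
        rw [ih (n - 1).toNat (by omega) (n - 1) rfl (s - n) (a ++ [n]) b]
        refine Prod.ext (by simp) ?_
        simp only [List.filter_cons]
        have hne : (!((n :: pvSel (n - 1) (s - n)).contains n)) = false := by simp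
        simp only [hne, Bool.false_eq_true, if_false]
        congr 1
        apply List.filter_congr
        intro x hx
        have hxr := (PySem.List.mem_pyRange_neg_one.mp hx)
        have hxn : x ≠ n := by omega
        simp [List.contains_eq_mem, hxn]
      · simp only [hn, hs, if_true, if_false]
        rw [ih (n - 1).toNat (by omega) (n - 1) rfl s a (b ++ [n])]
        refine Prod.ext rfl ?_
        simp only [List.filter_cons]
        have hnmem : n ∉ pvSel (n - 1) s := by
          intro h; have := pvSel_mem_le (n - 1) s n h; omega
        simp [List.contains_eq_mem, hnmem]
    · simp [hn, PySem.List.pyRange_neg_one_eq_nil (by omega : n ≤ (0:Int))]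

-- the binary-search predicate, its monotonicity, and the boundary characterisation
def dtP (m t k : Int) : Prop := m * (m + 1) - k * (k - 1) ≤ 2 * t

lemma dtP_mono (m t a b : Int) (h0 : 0 ≤ a) (hab : a ≤ b) (hP : dtP m t a) : dtP m t b := by
  unfold dtP at *
  rcases eq_or_lt_of_le hab with rfl | hlt
  · exact hP
  · have hprod : 0 ≤ (b - a) * (a + b - 1) := mul_nonneg (by omega) (by omega)
    have he : b * (b - 1) - a * (a - 1) = (b - a) * (a + b - 1) := by ring
    linarith

lemma dt_bsearch_spec : ∀ (lo hi m t : Int), lo ≤ hi → dtP m t hi →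
    lo ≤ dt_bsearch m t lo hi ∧ dt_bsearch m t lo hi ≤ hi ∧ dtP m t (dt_bsearch m t lo hi) ∧
      (dt_bsearch m t lo hi = lo ∨ ¬ dtP m t (dt_bsearch m t lo hi - 1)) := by
  intro lo hi
  induction hd : (hi - lo).toNat using Nat.strong_induction_on generalizing lo hi with
  | _ d ih =>
    intro m t hle hhi
    unfold dt_bsearch
    by_cases h : lo < hi
    · simp only [h, if_true]
      have hmid := PySem.Int.floordiv_two_mid_bounds (lo := lo) (hi := hi) (by omega)
      have hmlt : PySem.Int.floordiv (lo + hi) 2 < hi := by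
        rw [PySem.Int.floordiv_eq_ediv_of_pos (by omega)]; omega
      set mid := PySem.Int.floordiv (lo + hi) 2 with hmd
      by_cases hp : m * (m + 1) - mid * (mid - 1) ≤ 2 * t
      · simp only [hp, if_true]
        have h' := ih (mid - lo).toNat (by omega) lo mid rfl m t (by omega) hp
        exact ⟨h'.1, by omega, h'.2.2⟩
      · simp only [hp, if_false]
        have h' := ih (hi - (mid + 1)).toNat (by omega) (mid + 1) hi rfl m t (by omega) hhi
        refine ⟨by omega, h'.2.1, h'.2.2.1, ?_⟩
        rcases h'.2.2.2 with he | hnp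
        · right; rw [he]; simpa [dtP] using hp
        · right; exact hnp
    · simp only [h, if_false]
      have hh : lo = hi := by omega
      subst hh
      exact ⟨le_refl _, le_refl _, hhi, Or.inl (by trivial)⟩

lemma dt_key_unique (m t k1 k2 : Int) (h11 : 1 ≤ k1)
    (hP1 : dtP m t k1) (hB1 : k1 = 1 ∨ ¬ dtP m t (k1 - 1))
    (h21 : 1 ≤ k2)
    (hP2 : dtP m t k2) (hB2 : k2 = 1 ∨ ¬ dtP m t (k2 - 1)) : k1 = k2 := by
  by_contra hne
  rcases lt_or_gt_of_ne hne with hlt | hgt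
  · rcases hB2 with he | hnp
    · omega
    · exact hnp (dtP_mono m t k1 (k2 - 1) (by omega) (by omega) hP1)
  · rcases hB1 with he | hnp
    · omega
    · exact hnp (dtP_mono m t k2 (k1 - 1) (by omega) (by omega) hP2)

-- parity: the block sum denominator divides exactly
lemma two_dvd_mul_pred (a : Int) : (2:Int) ∣ a * (a - 1) := by
  rcases Int.even_or_odd a with ⟨c, hc⟩ | ⟨c, hc⟩
  · exact ⟨c * (a - 1), by rw [hc]; ring⟩
  · exact ⟨a * c, by rw [hc]; ring⟩

lemma two_dvd_block (m k : Int) : (2:Int) ∣ m * (m + 1) - k * (k - 1) := by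
  have h1 : (2:Int) ∣ m * (m + 1) := by
    have := two_dvd_mul_pred (m + 1)
    have he : (m + 1) * (m + 1 - 1) = m * (m + 1) := by ring
    rwa [he] at this
  exact dvd_sub h1 (two_dvd_mul_pred k)

-- the leftover value r, and B's a-list, proof-side
def rOf (m t k : Int) : Int := t - PySem.Int.floordiv (m * (m + 1) - k * (k - 1)) 2

lemma rOf_eq (m t k : Int) : rOf m t k = t - (m * (m + 1) - k * (k - 1)) / 2 := by
  unfold rOf
  rw [PySem.Int.floordiv_eq_ediv_of_pos (by omega : (0:Int) < 2)]

def selBody (m t k : Int) : List Int :=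
  PySem.List.pyRange m (k - 1) (-1) ++ (if 0 < rOf m t k ∧ rOf m t k < k then [rOf m t k] else [])

def selClosed (n t : Int) : List Int :=
  if min n t ≤ 0 then [] else
    selBody (min n t) t (dt_bsearch (min n t) t 1 (min n t))

lemma selClosed_nonpos (n t : Int) (h : min n t ≤ 0) : selClosed n t = [] := by
  unfold selClosed; rw [if_pos h]

lemma selClosed_pos (n t : Int) (h : 0 < min n t) :
    selClosed n t = selBody (min n t) t (dt_bsearch (min n t) t 1 (min n t)) := by
  unfold selClosed; rw [if_neg (by omega)]

lemma selFacts (m t : Int) (hm : 1 ≤ m) (hmt : m ≤ t) :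
    1 ≤ dt_bsearch m t 1 m ∧ dt_bsearch m t 1 m ≤ m ∧ dtP m t (dt_bsearch m t 1 m) ∧
      (dt_bsearch m t 1 m = 1 ∨ ¬ dtP m t (dt_bsearch m t 1 m - 1)) := by
  apply dt_bsearch_spec 1 m m t hm
  unfold dtP
  have he : m * (m + 1) - m * (m - 1) = 2 * m := by ring
  linarith

lemma rOf_self (m t : Int) : rOf m t m = t - m := by
  rw [rOf_eq]
  have he : m * (m + 1) - m * (m - 1) = 2 * m := by ring
  rw [he, Int.mul_ediv_cancel_left m (by norm_num : (2:Int) ≠ 0)]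

-- when the whole budget fits below the top, the greedy closed form is the single value t
lemma selClosed_singleton (n t : Int) (h1 : 1 ≤ t) (h2 : t ≤ n) : selClosed n t = [t] := by
  have hmin : min n t = t := by omega
  rw [selClosed_pos n t (by omega), hmin]
  obtain ⟨hk1, hk2, hkP, hkB⟩ := selFacts t t h1 (le_refl t)
  have hkt : dt_bsearch t t 1 t = t := by
    apply dt_key_unique t t _ t hk1 hkP hkB h1
    · unfold dtP
      have he : t * (t + 1) - t * (t - 1) = 2 * t := by ring
      linarith
    · by_cases ht1 : t = 1
      · exact Or.inl ht1
      · right; unfold dtP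
        intro hcon
        have he : t * (t + 1) - (t - 1) * (t - 1 - 1) = 4 * t - 2 := by ring
        have ht2 : 2 ≤ t := by omega
        linarith

  rw [hkt]
  unfold selBody
  rw [rOf_self]
  rw [if_neg (by omega)]
  rw [PySem.List.pyRange_neg_one_cons (by omega : t - 1 < t),
      PySem.List.pyRange_neg_one_eq_nil (by omega : t - 1 ≤ t - 1), List.append_nil]

-- the heart: A's greedy selection equals B's closed form
lemma sel_eq_closed : ∀ (n t : Int), pvSel n t = selClosed n t := by
  intro n
  induction hm : n.toNat using Nat.strong_induction_on generalizing n with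
  | _ md ih =>
    intro t
    unfold pvSel
    by_cases hn : n > 0
    · by_cases hs : n ≤ t
      · -- take n, recurse with budget t - n
        simp only [hn, hs, if_true]
        rw [ih (n - 1).toNat (by omega) (n - 1) rfl (t - n)]
        have hmin : min n t = n := by omega
        obtain ⟨hk1, hk2, hkP, hkB⟩ := selFacts n t (by omega) hs
        set k := dt_bsearch n t 1 n with hkdef
        by_cases hkn : k ≤ n - 1
        · -- the block continues below n: same split point for (n-1, t-n)
          have ht2 : 2 * n - 1 ≤ t := by
            have hPn1 : dtP n t (n - 1) := dtP_mono n t k (n - 1) (by omega) (by omega) hkP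
            unfold dtP at hPn1
            have he : n * (n + 1) - (n - 1) * (n - 1 - 1) = 4 * n - 2 := by ring
            linarith
          have hmin' : min (n - 1) (t - n) = n - 1 := by omega
          obtain ⟨hk1', hk2', hkP', hkB'⟩ := selFacts (n - 1) (t - n) (by omega) (by omega)
          set k' := dt_bsearch (n - 1) (t - n) 1 (n - 1) with hk'def
          have hPiff : ∀ j : Int, dtP (n - 1) (t - n) j ↔ dtP n t j := by
            intro j; unfold dtP
            have he : (n - 1) * (n - 1 + 1) = n * (n + 1) - 2 * n := by ring
            constructor <;> intro h <;> linarith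
          have hkk : k = k' := by
            apply dt_key_unique n t k k' hk1 hkP hkB hk1' ((hPiff k').mp hkP')
            rcases hkB' with he | hnp
            · exact Or.inl he
            · exact Or.inr (fun h => hnp ((hPiff (k' - 1)).mpr h))
          have hr : rOf (n - 1) (t - n) k = rOf n t k := by
            rw [rOf_eq, rOf_eq]
            have hXY : (n - 1) * (n - 1 + 1) - k * (k - 1) = n * (n + 1) - k * (k - 1) - 2 * n := by
              ring
            rw [hXY]
            have hY := Int.mul_ediv_cancel' (two_dvd_block n k)
            generalize n * (n + 1) - k * (k - 1) = Y at hY ⊢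
            omega
          rw [selClosed_pos n t (by omega), selClosed_pos (n - 1) (t - n) (by omega),
              hmin, hmin', ← hkdef, ← hk'def, ← hkk]
          unfold selBody
          rw [hr]
          rw [PySem.List.pyRange_neg_one_cons (by omega : k - 1 < n), List.cons_append]
        · -- the block is just [n]; the leftover (if any) is t - n
          have hken : k = n := by omega
          rw [selClosed_pos n t (by omega), hmin, ← hkdef, hken]
          unfold selBody
          rw [rOf_self]
          rw [PySem.List.pyRange_neg_one_cons (by omega : n - 1 < n),
              PySem.List.pyRange_neg_one_eq_nil (by omega : n - 1 ≤ n - 1)]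
          by_cases hr : 0 < t - n ∧ t - n < n
          · -- leftover exists: the recursive closed form is exactly [t - n]
            have hbound : t - n ≤ n - 1 := by
              -- for n = 1 from hr; for n ≥ 2 from the boundary ¬dtP(n-1)
              rcases hkB with he | hnp
              · omega
              · rw [hken] at hnp; unfold dtP at hnp
                have he2 : n * (n + 1) - (n - 1) * (n - 1 - 1) = 4 * n - 2 := by ring
                rw [he2] at hnp
                omega
            rw [if_pos hr, selClosed_singleton (n - 1) (t - n) (by omega) (by omega)]
            rfl
          · rw [if_neg hr]
            have hz : selClosed (n - 1) (t - n) = [] := by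
              by_cases hn1 : n = 1
              · exact selClosed_nonpos (n - 1) (t - n) (by omega)
              · -- n ≥ 2: boundary gives t ≤ 2n - 2, and ¬hr gives t - n ≤ 0
                have htn : t - n ≤ 0 := by
                  by_contra hpos
                  rcases hkB with he | hnp
                  · omega
                  · rw [hken] at hnp; unfold dtP at hnp
                    have he2 : n * (n + 1) - (n - 1) * (n - 1 - 1) = 4 * n - 2 := by ring
                    rw [he2] at hnp
                    omega
                exact selClosed_nonpos (n - 1) (t - n) (by omega)
            rw [hz, List.append_nil]
      · -- skip n
        simp only [hn, hs, if_true, if_false]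
        rw [ih (n - 1).toNat (by omega) (n - 1) rfl t]
        by_cases ht : t ≤ 0
        · rw [selClosed_nonpos n t (by omega), selClosed_nonpos (n - 1) t (by omega)]
        · have h1 : min n t = t := by omega
          have h2 : min (n - 1) t = t := by omega
          rw [selClosed_pos n t (by omega), selClosed_pos (n - 1) t (by omega), h1, h2]
    · simp only [hn, if_false]
      rw [selClosed_nonpos n t (by omega)]

-- descending ranges split at any point
lemma pyRange_neg_one_append (a m b : Int) (h1 : b ≤ m) (h2 : m ≤ a) :
    PySem.List.pyRange a b (-1) = PySem.List.pyRange a m (-1) ++ PySem.List.pyRange m b (-1) := by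
  rw [PySem.List.pyRange_neg_one_eq_reverse, PySem.List.pyRange_neg_one_eq_reverse,
      PySem.List.pyRange_neg_one_eq_reverse, ← List.reverse_append,
      ← PySem.List.pyRange_one_append (b + 1) (m + 1) (a + 1) (by omega) (by omega)]

-- membership in B's a-list
lemma mem_selBody (m t k x : Int) :
    x ∈ selBody m t k ↔ (k ≤ x ∧ x ≤ m) ∨ ((0 < rOf m t k ∧ rOf m t k < k) ∧ x = rOf m t k) := by
  unfold selBody
  rw [List.mem_append, PySem.List.mem_pyRange_neg_one]
  by_cases hc : 0 < rOf m t k ∧ rOf m t k < k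
  · rw [if_pos hc]
    simp only [List.mem_singleton]
    constructor
    · rintro (h | h)
      · left; omega
      · exact Or.inr ⟨hc, h⟩
    · rintro (h | h)
      · left; omega
      · right; exact h.2
  · rw [if_neg hc]
    simp only [List.not_mem_nil, or_false]
    constructor
    · intro h; left; omega
    · rintro (h | h)
      · omega
      · exact absurd h.1 hc

-- the complement pass: filtering selClosed out of n..1 gives B's b-list
lemma notmem_bool (l : List Int) (x : Int) (h : x ∉ l) : (!(l.contains x)) = true := by
  simp [List.contains_eq_mem, h]

lemma mem_bool (l : List Int) (x : Int) (h : x ∈ l) : (!(l.contains x)) = false := by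
  simp [List.contains_eq_mem, h]

lemma filter_eq_b (n t m k : Int) (hm : m = min n t) (hm1 : 1 ≤ m)
    (hk : k = dt_bsearch m t 1 m) (hk1 : 1 ≤ k) (hk2 : k ≤ m) :
    (PySem.List.pyRange n 0 (-1)).filter (fun x => !((selClosed n t).contains x)) =
      if 0 < rOf m t k ∧ rOf m t k < k then
        PySem.List.pyRange n m (-1) ++ PySem.List.pyRange (k - 1) (rOf m t k) (-1) ++
          PySem.List.pyRange (rOf m t k - 1) 0 (-1)
      else
        PySem.List.pyRange n m (-1) ++ PySem.List.pyRange (k - 1) 0 (-1) := by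
  have hmn : m ≤ n := by omega
  have hsel : selClosed n t = selBody m t k := by
    rw [selClosed_pos n t (by omega), ← hm, ← hk]
  rw [hsel]
  rw [pyRange_neg_one_append n m 0 (by omega) hmn, List.filter_append]
  have hseg1 : (PySem.List.pyRange n m (-1)).filter (fun x => !((selBody m t k).contains x)) =
      PySem.List.pyRange n m (-1) := by
    apply List.filter_eq_self.mpr
    intro x hx
    have hxr := PySem.List.mem_pyRange_neg_one.mp hx
    apply notmem_bool
    rw [mem_selBody]
    rintro (h | h) <;> omega
  rw [hseg1]
  rw [pyRange_neg_one_append m (k - 1) 0 (by omega) (by omega), List.filter_append]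
  have hseg2 : (PySem.List.pyRange m (k - 1) (-1)).filter (fun x => !((selBody m t k).contains x)) =
      [] := by
    rw [List.filter_eq_nil_iff]
    intro x hx
    have hxr := PySem.List.mem_pyRange_neg_one.mp hx
    have hmem : x ∈ selBody m t k := by rw [mem_selBody]; left; omega
    rw [mem_bool _ _ hmem]
    simp
  rw [hseg2, List.nil_append]
  by_cases hc : 0 < rOf m t k ∧ rOf m t k < k
  · rw [if_pos hc]
    rw [pyRange_neg_one_append (k - 1) (rOf m t k) 0 (by omega) (by omega), List.filter_append,
        PySem.List.pyRange_neg_one_cons (by omega : (0:Int) < rOf m t k), List.filter_cons]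
    have hseg3 : (PySem.List.pyRange (k - 1) (rOf m t k) (-1)).filter
        (fun x => !((selBody m t k).contains x)) = PySem.List.pyRange (k - 1) (rOf m t k) (-1) := by
      apply List.filter_eq_self.mpr
      intro x hx
      have hxr := PySem.List.mem_pyRange_neg_one.mp hx
      apply notmem_bool
      rw [mem_selBody]
      rintro (h | h) <;> omega
    have hrin : (!((selBody m t k).contains (rOf m t k))) = false := by
      apply mem_bool
      rw [mem_selBody]
      exact Or.inr ⟨hc, rfl⟩
    rw [hseg3, hrin]
    simp only [Bool.false_eq_true, if_false]
    have hseg4 : (PySem.List.pyRange (rOf m t k - 1) 0 (-1)).filter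
        (fun x => !((selBody m t k).contains x)) = PySem.List.pyRange (rOf m t k - 1) 0 (-1) := by
      apply List.filter_eq_self.mpr
      intro x hx
      have hxr := PySem.List.mem_pyRange_neg_one.mp hx
      apply notmem_bool
      rw [mem_selBody]
      rintro (h | h) <;> omega
    rw [hseg4, List.append_assoc]
  · rw [if_neg hc]
    have hseg5 : (PySem.List.pyRange (k - 1) 0 (-1)).filter (fun x => !((selBody m t k).contains x)) =
        PySem.List.pyRange (k - 1) 0 (-1) := by
      apply List.filter_eq_self.mpr
      intro x hx
      have hxr := PySem.List.mem_pyRange_neg_one.mp hx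
      apply notmem_bool
      rw [mem_selBody]
      rintro (h | h)
      · omega
      · exact hc h.1
    rw [hseg5]

-- ===== VERDICT (by name: the statement is the Claim_ definition above) =====
theorem deliver_twins_spec : Claim_equal_deliver_twins := by
  intro n s _
  unfold Spec_deliver_twins deliver_twins deliver_twins_alt
  rw [loop_eq_sel]
  simp only [List.nil_append]
  set t := PySem.Int.floordiv s 2 with htdef
  rw [sel_eq_closed]
  by_cases hm : min n t ≤ 0
  · rw [if_pos hm]
    have hsel : selClosed n t = [] := selClosed_nonpos n t hm
    rw [hsel]
    refine Prod.ext rfl ?_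
    simp
  · rw [if_neg hm]
    obtain ⟨hk1, hk2, hkP, hkB⟩ := selFacts (min n t) t (by omega) (by omega)
    set m := min n t with hmdef
    set k := dt_bsearch m t 1 m with hkdef
    have hb := filter_eq_b n t m k hmdef (by omega) hkdef hk1 hk2
    have hrB : t - PySem.Int.floordiv (m * (m + 1) - k * (k - 1)) 2 = rOf m t k := rfl
    by_cases hc : 0 < rOf m t k ∧ rOf m t k < k
    · rw [hrB, if_pos hc]
      refine Prod.ext ?_ ?_
      · show selClosed n t = PySem.List.pyRange m (k - 1) (-1) ++ [rOf m t k]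
        rw [selClosed_pos n t (by omega), ← hmdef, ← hkdef]
        unfold selBody
        rw [if_pos hc]
      · show (PySem.List.pyRange n 0 (-1)).filter _ = _
        rw [hb, if_pos hc]
    · rw [hrB, if_neg hc]
      refine Prod.ext ?_ ?_
      · show selClosed n t = PySem.List.pyRange m (k - 1) (-1)
        rw [selClosed_pos n t (by omega), ← hmdef, ← hkdef]
        unfold selBody
        rw [if_neg hc, List.append_nil]
      · show (PySem.List.pyRange n 0 (-1)).filter _ = _
        rw [hb, if_neg hc]
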